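-- pv_equiv track=rewrite | github.com/treegem/AdvendOfCode2020 | src/main/day6/day6.py | group_answers_with_yes_by_everyone
-- ===== SOURCE A (Python) =====
-- from typing import List, Set
--
-- def group_answers_with_yes_by_everyone(answers: List[str]) -> List[Set[str]]:
--     grouped_answers = []
--     one_groups_answers = set()
--     new_group = True
--     for one_persons_answers in answers:
--
--         if one_persons_answers == '':
--             grouped_answers.append(one_groups_answers)
--             one_groups_answers = set()
--             new_group = True
--             continue
--
--         if new_group:
--             one_groups_answers = __add_all_chars_to_one_groups_answers(one_groups_answers, one_persons_answers)
--         elif one_groups_answers: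
--             one_groups_answers = __remove_inconsistent_answers(one_groups_answers, one_persons_answers)
--
--         new_group = False
--
--     if one_groups_answers:
--         grouped_answers.append(one_groups_answers)
--
--     return grouped_answers
--
-- def __add_all_chars_to_one_groups_answers(one_groups_answers, one_persons_answers):
--     for char in one_persons_answers:
--         one_groups_answers.add(char)
--     return one_groups_answers
--
-- def __remove_inconsistent_answers(one_groups_answers, one_persons_answers):
--     one_groups_answers_with_yes_by_everyone_so_far = one_groups_answers.copy()
--     for char in one_groups_answers:
--         if char not in one_persons_answers:
--             one_groups_answers_with_yes_by_everyone_so_far.remove(char)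
--     return one_groups_answers_with_yes_by_everyone_so_far
-- ===== SOURCE B (Python) =====
-- from typing import List, Set
--
--
-- def group_answers_with_yes_by_everyone(answers: List[str]) -> List[Set[str]]:
--     # Counting algorithm: tally, per group, in how many person-lines each character
--     # occurs; a character was answered by everyone iff its tally equals the group size.
--     grouped_answers = []
--     counts = {}
--     group_size = 0
--     for line in answers:
--         if line == '':
--             grouped_answers.append({ch for ch, c in counts.items() if c == group_size})
--             counts = {}
--             group_size = 0
--         else:
--             group_size += 1
--             for ch in dict.fromkeys(line):
--                 counts[ch] = counts.get(ch, 0) + 1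
--     final = {ch for ch, c in counts.items() if c == group_size}
--     if final:
--         grouped_answers.append(final)
--     return grouped_answers
-- ===== Notes on version B (the rewrite author's own statement) =====
-- stated objective: alternative
-- what changed: B replaces A's running candidate-set with add/remove-inconsistent passes by a counting algorithm: it tallies, per group, in how many person-lines each character occurs and emits the characters whose tally equals the group size.
import Mathlib
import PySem

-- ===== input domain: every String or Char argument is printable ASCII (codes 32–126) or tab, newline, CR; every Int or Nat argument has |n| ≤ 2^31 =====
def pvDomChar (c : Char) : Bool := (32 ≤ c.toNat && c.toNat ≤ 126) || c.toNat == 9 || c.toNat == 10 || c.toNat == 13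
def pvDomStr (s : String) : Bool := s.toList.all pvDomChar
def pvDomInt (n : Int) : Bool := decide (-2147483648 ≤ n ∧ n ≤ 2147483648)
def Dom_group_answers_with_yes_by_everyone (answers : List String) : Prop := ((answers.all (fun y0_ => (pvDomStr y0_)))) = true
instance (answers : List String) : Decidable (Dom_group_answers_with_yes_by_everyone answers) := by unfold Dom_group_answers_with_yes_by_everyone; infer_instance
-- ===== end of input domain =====

-- B is an alternative algorithm: instead of A's running candidate set (add all chars of the
-- first person, then remove the inconsistent ones person by person), B tallies per group in how
-- many person-lines each character occurs and emits the characters whose tally equals the group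
-- size. Sets of single-character answer strings are PySem.Set String; both Python programs
-- return equal sets (hash order is not modelled, outputs are compared as sets).

-- ===== PORT A =====
-- __add_all_chars_to_one_groups_answers (iterating a str yields 1-char strings)
def pvAddAll (s : PySem.Set String) (p : String) : PySem.Set String :=
  p.toList.foldl (fun acc c => PySem.Set.add acc (String.ofList [c])) s

-- __remove_inconsistent_answers: iterate the set, remove chars absent from the person's string.
-- The copy's elements are distinct and each removed element is visited once, so Python's
-- set.remove never raises and equals Set.discard here — exact.
def pvRemoveInc (s : PySem.Set String) (p : String) : PySem.Set String :=
  s.foldl (fun acc ch => if PySem.Str.isIn ch p then acc else PySem.Set.discard acc ch) s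

def pvLoopA : List String → List (List String) → PySem.Set String → Bool → List (List String)
  | [], grouped, cur, _ => if cur = [] then grouped else grouped ++ [cur]
  | p :: rest, grouped, cur, newGroup =>
    if p = "" then pvLoopA rest (grouped ++ [cur]) PySem.Set.empty true
    else
      pvLoopA rest grouped
        (if newGroup then pvAddAll cur p else if cur = [] then cur else pvRemoveInc cur p) false

def group_answers_with_yes_by_everyone (answers : List String) : List (List String) :=
  pvLoopA answers [] PySem.Set.empty true

-- ===== PORT B =====
-- the inner 'for ch in dict.fromkeys(line): counts[ch] = counts.get(ch, 0) + 1'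
def pvBump (counts : PySem.Dict Char Int) (line : String) : PySem.Dict Char Int :=
  (PySem.List.dedup line.toList).foldl (fun d ch => d.insert ch (d.getD ch 0 + 1)) counts

-- '{ch for ch, c in counts.items() if c == n}' (a set of 1-char strings, built in items order)
def pvEmit (counts : PySem.Dict Char Int) (n : Int) : List String :=
  PySem.Set.ofList ((counts.items.filter (fun kv => kv.2 == n)).map (fun kv => String.ofList [kv.1]))

def pvLoopB : List String → List (List String) → PySem.Dict Char Int → Int → List (List String)
  | [], grouped, counts, groupSize =>
    if pvEmit counts groupSize = [] then grouped else grouped ++ [pvEmit counts groupSize]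
  | line :: rest, grouped, counts, groupSize =>
    if line = "" then pvLoopB rest (grouped ++ [pvEmit counts groupSize]) PySem.Dict.empty 0
    else pvLoopB rest grouped (pvBump counts line) (groupSize + 1)

def group_answers_with_yes_by_everyone_alt (answers : List String) : List (List String) :=
  pvLoopB answers [] PySem.Dict.empty 0

-- ===== PRECONDITION & SPEC =====
def Spec_group_answers_with_yes_by_everyone (answers : List String) (out : List (List String)) : Prop := out = group_answers_with_yes_by_everyone_alt answers
instance (answers : List String) (out : List (List String)) : Decidable (Spec_group_answers_with_yes_by_everyone answers out) := by unfold Spec_group_answers_with_yes_by_everyone; infer_instance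

-- ===== CLAIM (what is proved, stated in full; the proofs are below) =====
def Claim_equal_group_answers_with_yes_by_everyone : Prop := ∀ (answers : List String), Dom_group_answers_with_yes_by_everyone answers → Spec_group_answers_with_yes_by_everyone answers (group_answers_with_yes_by_everyone answers)

-- ===== LEMMAS AND PROOFS =====

-- proof-side ghost state: the persons of the current group processed so far
-- A's running set, characterized at char level: first person's distinct chars, filtered
def pvCharInter : List String → List Char
  | [] => []
  | p :: ps => ps.foldl (fun acc q => acc.filter (fun c => decide (c ∈ q.toList))) (PySem.List.dedup p.toList)

def pvSingle (c : Char) : String := String.ofList [c]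

def pvCurOf (gs : List String) : List String := (pvCharInter gs).map pvSingle

-- B's counter and the flattened per-person distinct-char list
def pvCountsOf (gs : List String) : PySem.Dict Char Int := gs.foldl pvBump PySem.Dict.empty
def pvL (gs : List String) : List Char := gs.flatMap (fun p => PySem.List.dedup p.toList)

theorem pvSingle_inj : Function.Injective pvSingle := by
  intro a b h
  simpa [pvSingle] using congrArg String.toList h

theorem ofList_nodup_id {α : Type} [DecidableEq α] (l : List α) (h : l.Nodup) :
    PySem.Set.ofList l = l := by
  rw [PySem.Set.ofList_eq_foldl]
  suffices H : ∀ (l : List α) (acc : List α), (acc ++ l).Nodup → l.foldl PySem.Set.add acc = acc ++ l by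
    simpa using H l [] (by simpa using h)
  intro l
  induction l with
  | nil => intro acc _; simp
  | cons x t ih =>
    intro acc hnd
    have hx : x ∉ acc := by
      intro hmem
      exact (List.disjoint_of_nodup_append hnd) hmem (by simp)
    have hadd : PySem.Set.add acc x = acc ++ [x] := by
      simp [PySem.Set.add, PySem.Set.contains, hx]
    rw [List.foldl_cons, hadd, ih (acc ++ [x]) (by simpa using hnd)]
    simp

theorem foldl_add_map_single (l : List Char) : ∀ (acc : List Char),
    (l.map pvSingle).foldl PySem.Set.add (acc.map pvSingle)
      = (l.foldl PySem.Set.add acc).map pvSingle := by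
  induction l with
  | nil => intro acc; simp
  | cons x l ih =>
    intro acc
    have hadd : PySem.Set.add (acc.map pvSingle) (pvSingle x) = (PySem.Set.add acc x).map pvSingle := by
      by_cases hx : x ∈ acc
      · simp [PySem.Set.add, PySem.Set.contains, hx, List.mem_map.mpr ⟨x, hx, rfl⟩]
      · have hx' : pvSingle x ∉ acc.map pvSingle := by
          intro hm
          rcases List.mem_map.mp hm with ⟨y, hy, hxy⟩
          exact hx (pvSingle_inj hxy ▸ hy)
        simp [PySem.Set.add, PySem.Set.contains, hx, hx']
    rw [List.map_cons, List.foldl_cons, List.foldl_cons, hadd, ih]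

theorem ofList_map_single (l : List Char) :
    PySem.Set.ofList (l.map pvSingle) = (PySem.Set.ofList l).map pvSingle := by
  simpa [PySem.Set.ofList_eq_foldl] using foldl_add_map_single l []

-- adding all chars of p to the empty set is set(p)
theorem pvAddAll_empty (p : String) :
    pvAddAll PySem.Set.empty p = (PySem.Set.ofList p.toList).map pvSingle := by
  rw [← ofList_map_single, PySem.Set.ofList_eq_foldl, List.foldl_map]
  rfl

-- 'ch in p' for a 1-char string is char membership
theorem isIn_single (c : Char) (p : String) :
    PySem.Str.isIn (pvSingle c) p = decide (c ∈ p.toList) := by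
  have hiff : PySem.Chars.isIn [c] p.toList = true ↔ c ∈ p.toList := by
    rw [PySem.Chars.isIn_iff_infix]
    constructor
    · intro h; simpa using h.sublist.subset (List.mem_singleton_self c)
    · intro h
      rcases List.append_of_mem h with ⟨s, t, hst⟩
      exact ⟨s, t, by rw [hst]; simp⟩
  rw [show PySem.Str.isIn (pvSingle c) p
        = PySem.Chars.isIn (pvSingle c).toList p.toList from rfl,
    show (pvSingle c).toList = [c] by simp [pvSingle]]
  by_cases hin : c ∈ p.toList
  · simp [hiff.mpr hin, hin]
  · simp [hin, ← Bool.not_eq_true, hiff]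

-- the remove loop of __remove_inconsistent_answers, generalized
theorem removeLoop_eq (l : List String) (p : String) : ∀ (acc : List String),
    l.foldl (fun a ch => if PySem.Str.isIn ch p then a else PySem.Set.discard a ch) acc
      = acc.filter (fun y => !(l.contains y && !(PySem.Str.isIn y p))) := by
  induction l with
  | nil => intro acc; simp
  | cons ch l ih =>
    intro acc
    cases h : PySem.Str.isIn ch p with
    | true =>
      rw [List.foldl_cons, if_pos h, ih]
      apply List.filter_congr
      intro y _
      by_cases hy : y = ch
      · subst hy; rw [h]; simp
      · simp [hy]
    | false =>
      rw [List.foldl_cons, if_neg (by rw [h]; exact Bool.false_ne_true), ih, PySem.Set.discard, List.filter_filter]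
      apply List.filter_congr
      intro y _
      by_cases hy : y = ch
      · subst hy; rw [h]; simp
      · simp [hy]

-- on a list of singleton strings, A's removal step is a char-level filter
theorem pvRemoveInc_map_single (cs : List Char) (p : String) :
    pvRemoveInc (cs.map pvSingle) p
      = (cs.filter (fun c => decide (c ∈ p.toList))).map pvSingle := by
  rw [pvRemoveInc, removeLoop_eq, List.filter_map]
  apply congrArg (List.map pvSingle)
  apply List.filter_congr
  intro c hc
  have hcont : (cs.map pvSingle).contains (pvSingle c) = true :=
    List.contains_iff_mem.mpr (List.mem_map.mpr ⟨c, hc, rfl⟩)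
  have hgoal : (!((cs.map pvSingle).contains (pvSingle c) && !PySem.Str.isIn (pvSingle c) p))
      = decide (c ∈ p.toList) := by
    rw [hcont, isIn_single]; simp
  exact hgoal

-- B's counting state is Counter(flattened deduped persons)
theorem countsOf_eq_counter (gs : List String) :
    pvCountsOf gs = PySem.Dict.counter (pvL gs) := by
  rw [← PySem.Dict.foldl_insert_getD_add_one_eq_counter, pvL, List.foldl_flatMap]
  rfl

-- each char is counted once per person containing it
theorem count_pvL (gs : List String) (c : Char) :
    (pvL gs).count c = gs.countP (fun p => decide (c ∈ p.toList)) := by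
  induction gs with
  | nil => simp [pvL]
  | cons p t ih =>
    have hL : pvL (p :: t) = PySem.List.dedup p.toList ++ pvL t := by simp [pvL]
    rw [hL, List.count_append, ih, List.countP_cons]
    by_cases hc : c ∈ p.toList
    · have hm : c ∈ PySem.List.dedup p.toList := (PySem.List.mem_dedup _ _).mpr hc
      rw [List.count_eq_one_of_mem (PySem.List.nodup_dedup _) hm]
      simp [hc, Nat.add_comm]
    · have hm : c ∉ PySem.List.dedup p.toList := fun h => hc ((PySem.List.mem_dedup _ _).mp h)
      rw [List.count_eq_zero_of_not_mem hm]
      simp [hc]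

-- Set.update appends only fresh elements
theorem update_split {α : Type} [DecidableEq α] (l : List α) :
    ∀ (s : List α), ∃ t, PySem.Set.update s l = s ++ t ∧ ∀ c ∈ t, c ∉ s := by
  induction l with
  | nil => intro s; exact ⟨[], by simp [PySem.Set.update], by simp⟩
  | cons x l ih =>
    intro s
    by_cases hx : x ∈ s
    · have hadd : PySem.Set.add s x = s := by simp [PySem.Set.add, PySem.Set.contains, hx]
      rcases ih s with ⟨t, ht, hf⟩
      exact ⟨t, by simpa [PySem.Set.update, hadd] using (by simpa [PySem.Set.update] using ht), hf⟩
    · have hadd : PySem.Set.add s x = s ++ [x] := by simp [PySem.Set.add, PySem.Set.contains, hx]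
      rcases ih (s ++ [x]) with ⟨t, ht, hf⟩
      refine ⟨x :: t, ?_, ?_⟩
      · simpa [PySem.Set.update, hadd, List.append_assoc] using ht
      · intro c hc
        rcases List.mem_cons.mp hc with rfl | hc
        · exact hx
        · intro hcs; exact hf c hc (by simp [hcs])

-- the successive filters of A's group fold compose into one filter
theorem foldl_filter_eq (ps : List String) : ∀ (a : List Char),
    ps.foldl (fun acc q => acc.filter (fun c => decide (c ∈ q.toList))) a
      = a.filter (fun c => decide (∀ q ∈ ps, c ∈ q.toList)) := by
  induction ps with
  | nil => intro a; simp
  | cons q ps ih =>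
    intro a
    rw [List.foldl_cons, ih, List.filter_filter]
    apply List.filter_congr
    intro c _
    simp [Bool.and_comm]

-- the key lemma: B's emitted set equals A's running set, for any processed group prefix
theorem emit_eq_cur (gs : List String) :
    pvEmit (pvCountsOf gs) (gs.length : Int) = pvCurOf gs := by
  rw [pvEmit, countsOf_eq_counter, PySem.Dict.items_counter, List.filter_map, List.map_map]
  simp only [Function.comp_def, pvCurOf]
  have hcond : ∀ k ∈ PySem.Set.ofList (pvL gs),
      (((pvL gs).count k : Int) == (gs.length : Int)) = decide (∀ p ∈ gs, k ∈ p.toList) := by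
    intro k _
    rw [count_pvL]
    by_cases h : ∀ p ∈ gs, k ∈ p.toList
    · have hlen : gs.countP (fun p => decide (k ∈ p.toList)) = gs.length :=
        List.countP_eq_length.mpr (fun p hp => by simpa using h p hp)
      rw [hlen]
      simpa using h
    · have hne : gs.countP (fun p => decide (k ∈ p.toList)) ≠ gs.length := by
        intro hlen
        exact h (fun p hp => by simpa using List.countP_eq_length.mp hlen p hp)
      have hcast : ((gs.countP (fun p => decide (k ∈ p.toList)) : Int)) ≠ (gs.length : Int) := by
        exact_mod_cast hne
      simp [h, beq_eq_false_iff_ne, hcast]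
  rw [List.filter_congr hcond]
  -- now both sides are char-level
  cases gs with
  | nil => simp [pvL, pvCharInter]
  | cons p ps =>
    have hofl : PySem.Set.ofList (pvL (p :: ps))
        = PySem.Set.update (PySem.Set.ofList (PySem.List.dedup p.toList)) (pvL ps) := by
      rw [show pvL (p :: ps) = PySem.List.dedup p.toList ++ pvL ps by simp [pvL],
        PySem.Set.ofList_eq_foldl, List.foldl_append, ← PySem.Set.ofList_eq_foldl]
      rfl
    have hdnd : (PySem.List.dedup p.toList).Nodup := PySem.List.nodup_dedup _
    have hofd : PySem.Set.ofList (PySem.List.dedup p.toList) = PySem.List.dedup p.toList :=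
      ofList_nodup_id _ hdnd
    rcases update_split (pvL ps) (PySem.List.dedup p.toList) with ⟨t, ht, hfresh⟩
    rw [hofl, hofd, ht, List.filter_append]
    have htnil : t.filter (fun k => decide (∀ q ∈ p :: ps, k ∈ q.toList)) = [] := by
      apply List.filter_eq_nil_iff.mpr
      intro k hk
      have hknp : k ∉ p.toList := fun hkp =>
        hfresh k hk ((PySem.List.mem_dedup _ _).mpr hkp)
      simp only [decide_eq_true_eq]
      intro hall
      exact hknp (hall p (by simp))
    rw [htnil, List.append_nil]
    have hfl : (PySem.List.dedup p.toList).filter (fun k => decide (∀ q ∈ p :: ps, k ∈ q.toList))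
        = (PySem.List.dedup p.toList).filter (fun k => decide (∀ q ∈ ps, k ∈ q.toList)) := by
      apply List.filter_congr
      intro k hk
      have hkp : k ∈ p.toList := (PySem.List.mem_dedup _ _).mp hk
      simp [hkp]
    have hchar : pvCharInter (p :: ps)
        = (PySem.List.dedup p.toList).filter (fun k => decide (∀ q ∈ ps, k ∈ q.toList)) := by
      rw [pvCharInter, foldl_filter_eq]
    rw [hfl, hchar]
    -- outer Set.ofList is the identity: the list is nodup
    apply ofList_nodup_id
    exact List.Nodup.map pvSingle_inj (hdnd.filter _)

-- the main invariant: with ghost group prefix gs, A's state and B's state correspond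
theorem loop_eq (answers : List String) : ∀ (grouped : List (List String)) (gs : List String),
    pvLoopA answers grouped (pvCurOf gs) gs.isEmpty
      = pvLoopB answers grouped (pvCountsOf gs) (gs.length : Int) := by
  induction answers with
  | nil =>
    intro grouped gs
    rw [pvLoopA, pvLoopB, emit_eq_cur]
  | cons p rest ih =>
    intro grouped gs
    by_cases hp : p = ""
    · subst hp
      rw [pvLoopA, pvLoopB, if_pos rfl, if_pos rfl, emit_eq_cur]
      simpa using ih (grouped ++ [pvCurOf gs]) []
    · rw [pvLoopA, pvLoopB, if_neg hp, if_neg hp]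
      have hbump : pvBump (pvCountsOf gs) p = pvCountsOf (gs ++ [p]) := by
        simp [pvCountsOf, List.foldl_append]
      have hlen : (gs.length : Int) + 1 = ((gs ++ [p]).length : Int) := by
        simp
      rw [hbump, hlen]
      have hcur : (if gs.isEmpty then pvAddAll (pvCurOf gs) p
            else if pvCurOf gs = [] then pvCurOf gs else pvRemoveInc (pvCurOf gs) p)
          = pvCurOf (gs ++ [p]) := by
        cases gs with
        | nil =>
          simp only [List.nil_append, List.isEmpty_nil, if_true]
          rw [show pvCurOf [] = ([] : List String) from rfl,
            show pvAddAll [] p = pvAddAll PySem.Set.empty p from rfl, pvAddAll_empty]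
          simp [pvCurOf, pvCharInter]
        | cons g t =>
          have hci : pvCharInter (g :: (t ++ [p]))
              = (pvCharInter (g :: t)).filter (fun c => decide (c ∈ p.toList)) := by
            simp [pvCharInter, List.foldl_append]
          simp only [List.cons_append, List.isEmpty_cons, Bool.false_eq_true, if_false]
          by_cases hnil : pvCharInter (g :: t) = []
          · simp [pvCurOf, hnil, hci]
          · rw [if_neg (by simp [pvCurOf, hnil]),
              show pvCurOf (g :: t) = (pvCharInter (g :: t)).map pvSingle from rfl,
              pvRemoveInc_map_single,
              show pvCurOf (g :: (t ++ [p])) = (pvCharInter (g :: (t ++ [p]))).map pvSingle from rfl,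
              hci]
      rw [hcur]
      have hih := ih grouped (gs ++ [p])
      rwa [show (gs ++ [p]).isEmpty = false by simp] at hih

-- ===== VERDICT (by name: the statement is the Claim_ definition above) =====
theorem group_answers_with_yes_by_everyone_spec : Claim_equal_group_answers_with_yes_by_everyone := by
  intro answers _
  show group_answers_with_yes_by_everyone answers = group_answers_with_yes_by_everyone_alt answers
  have := loop_eq answers [] []
  simpa [group_answers_with_yes_by_everyone, group_answers_with_yes_by_everyone_alt,
    pvCurOf, pvCharInter, pvCountsOf, PySem.Set.empty] using this
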